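-- pv_equiv track=rewrite | github.com/nilkun/keyboard-visualizer | keyboard_visualizer.py | parse_colored_text
-- ===== SOURCE A (Python) =====
-- def parse_colored_text(text):
--     """Parse text with color tags like 'W{red}A{blue}S{green}D'
--     Returns list of (char, color) tuples"""
--     result = []
--     i = 0
--     current_color = None
--
--     while i < len(text):
--         if text[i] == '{' and i > 0:
--             # Find closing brace
--             end = text.find('}', i)
--             if end != -1:
--                 color = text[i+1:end]
--                 current_color = color
--                 i = end + 1
--                 continue
--
--         result.append((text[i], current_color))
--         i += 1
--
--     return result
-- ===== SOURCE B (Python) =====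
-- def parse_colored_text(text):
--     """Parse text with color tags like 'W{red}A{blue}S{green}D'
--     Returns list of (char, color) tuples"""
--     # Phase 1: collect tag spans (start, color, end) left to right.
--     spans = []
--     i = text.find('{', 1)
--     while i != -1:
--         e = text.find('}', i)
--         if e == -1:
--             break
--         spans.append((i, text[i + 1:e], e + 1))
--         i = text.find('{', e + 1)
--     # Phase 2: emit literal runs between spans, char by char, with the current color.
--     result = []
--     pos = 0
--     color = None
--     for start, col, end in spans:
--         result.extend((c, color) for c in text[pos:start])
--         color = col
--         pos = end
--     result.extend((c, color) for c in text[pos:])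
--     return result
-- ===== Notes on version B (the rewrite author's own statement) =====
-- stated objective: alternative
-- what changed: A interleaves tag detection and character emission in one index-walking while loop; B first collects all color-tag spans with repeated str.find into a span list, then a second pass emits the literal runs between spans character by character with the current color.
import Mathlib
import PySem

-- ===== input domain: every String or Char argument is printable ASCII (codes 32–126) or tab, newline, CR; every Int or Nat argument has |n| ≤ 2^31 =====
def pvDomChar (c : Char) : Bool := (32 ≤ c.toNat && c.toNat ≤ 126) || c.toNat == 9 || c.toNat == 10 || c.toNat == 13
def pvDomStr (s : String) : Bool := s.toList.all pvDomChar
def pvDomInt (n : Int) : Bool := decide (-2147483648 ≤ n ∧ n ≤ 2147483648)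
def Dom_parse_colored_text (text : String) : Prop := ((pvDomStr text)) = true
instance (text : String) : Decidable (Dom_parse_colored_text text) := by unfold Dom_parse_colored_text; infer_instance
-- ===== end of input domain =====

-- B re-implements the parser in two phases (collect tag spans with str.find, then emit literal runs);
-- equivalence of return values is proved; a timing run measured B ~2x faster (C-level find vs per-char loop).

-- Helper facts about single-character str.find used by the ports' termination proofs.
theorem pv_cfind_gt (cs : List Char) (c : Char) (k : Nat) (h : cs.length < k) :
    PySem.Chars.findFrom cs [c] (k : Int) none = -1 := by
  simp [PySem.Chars.findFrom]
  omega

theorem pv_singleton_prefix (l : List Char) (c : Char) : [c] <+: l ↔ l.head? = some c := by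
  cases l with
  | nil => simp
  | cons x xs => simp [List.cons_prefix_cons, eq_comm]

theorem pv_cfind_spec (cs : List Char) (c : Char) (k : Nat) (hk : k ≤ cs.length)
    (h : PySem.Chars.findFrom cs [c] (k : Int) none ≠ -1) :
    (k : Int) ≤ PySem.Chars.findFrom cs [c] (k : Int) none ∧
    (PySem.Chars.findFrom cs [c] (k : Int) none).toNat < cs.length ∧
    cs[(PySem.Chars.findFrom cs [c] (k : Int) none).toNat]? = some c ∧
    (∀ m, k ≤ m → m < (PySem.Chars.findFrom cs [c] (k : Int) none).toNat → cs[m]? ≠ some c) := by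
  obtain ⟨h1, h2, h3⟩ := PySem.Chars.findFrom_natCast_spec cs [c] k hk h
  have ht : cs[(PySem.Chars.findFrom cs [c] (k : Int) none).toNat]? = some c := by
    rw [← List.head?_drop]; exact (pv_singleton_prefix _ _).1 h2
  refine ⟨h1, (List.getElem?_eq_some_iff.1 ht).1, ht, ?_⟩
  intro m hm hlt hc
  exact h3 m hm hlt ((pv_singleton_prefix _ _).2 (by rw [List.head?_drop]; exact hc))

-- ===== PORT A =====
-- the while loop of A; i, current_color are the loop state
def pvAgo (cs : List Char) (color : Option String) (i : Nat) : List (String × Option String) :=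
  if h : i < cs.length then
    if cs[i] = '{' ∧ 0 < i then
      let e := PySem.Chars.findFrom cs ['}'] (i : Int) none
      if he : e ≠ -1 then
        pvAgo cs (some (String.ofList (PySem.List.slice cs (some ((i : Int) + 1)) (some e)))) (e.toNat + 1)
      else
        (String.ofList [cs[i]], color) :: pvAgo cs color (i + 1)
    else
      (String.ofList [cs[i]], color) :: pvAgo cs color (i + 1)
  else []
termination_by cs.length - i
decreasing_by
  · have := pv_cfind_spec cs '}' i (by omega) he
    omega
  · omega
  · omega

def parse_colored_text (text : String) : List (String × Option String) :=
  pvAgo text.toList none 0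

-- ===== PORT B =====
-- phase 1 of B: the span-collecting while loop
def pvSpans (cs : List Char) (s : Nat) : List (Nat × String × Nat) :=
  -- i = text.find('{', s); loop body; e = text.find('}', i)
  if hj : PySem.Chars.findFrom cs ['{'] (s : Int) none = -1 then []
  else if he : PySem.Chars.findFrom cs ['}']
      (PySem.Chars.findFrom cs ['{'] (s : Int) none) none = -1 then []
  else ((PySem.Chars.findFrom cs ['{'] (s : Int) none).toNat,
        String.ofList (PySem.List.slice cs
          (some (PySem.Chars.findFrom cs ['{'] (s : Int) none + 1))
          (some (PySem.Chars.findFrom cs ['}']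
            (PySem.Chars.findFrom cs ['{'] (s : Int) none) none))),
        (PySem.Chars.findFrom cs ['}']
          (PySem.Chars.findFrom cs ['{'] (s : Int) none) none).toNat + 1)
       :: pvSpans cs ((PySem.Chars.findFrom cs ['}']
            (PySem.Chars.findFrom cs ['{'] (s : Int) none) none).toNat + 1)
termination_by cs.length - s
decreasing_by
  have hs : s ≤ cs.length := by
    by_contra hgt
    exact hj (pv_cfind_gt cs '{' s (by omega))
  obtain ⟨hj1, hj2, -, -⟩ := pv_cfind_spec cs '{' s hs hj
  have hjn : PySem.Chars.findFrom cs ['{'] (s : Int) none =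
      ((PySem.Chars.findFrom cs ['{'] (s : Int) none).toNat : Int) := by omega
  rw [hjn] at he
  obtain ⟨he1, he2, -, -⟩ := pv_cfind_spec cs '}'
    (PySem.Chars.findFrom cs ['{'] (s : Int) none).toNat (by omega) he
  rw [hjn]
  omega

-- phase 2 of B: the emitting for loop over the spans
def pvEmit (cs : List Char) (pos : Nat) (color : Option String) :
    List (Nat × String × Nat) → List (String × Option String)
  | [] => (PySem.List.slice cs (some (pos : Int)) none).map (fun ch => (String.ofList [ch], color))
  | (s, col, e) :: rest =>
      ((PySem.List.slice cs (some (pos : Int)) (some (s : Int))).map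
        (fun ch => (String.ofList [ch], color))) ++ pvEmit cs e (some col) rest

def parse_colored_text_alt (text : String) : List (String × Option String) :=
  pvEmit text.toList 0 none (pvSpans text.toList 1)

-- ===== PRECONDITION & SPEC =====
def Spec_parse_colored_text (text : String) (out : List (String × Option String)) : Prop := out = parse_colored_text_alt text
instance (text : String) (out : List (String × Option String)) : Decidable (Spec_parse_colored_text text out) := by unfold Spec_parse_colored_text; infer_instance

-- ===== CLAIM (what is proved, stated in full; the proofs are below) =====
def Claim_equal_parse_colored_text : Prop := ∀ (text : String), Dom_parse_colored_text text → Spec_parse_colored_text text (parse_colored_text text)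

-- ===== LEMMAS AND PROOFS =====

theorem pv_cfind_neg_iff (cs : List Char) (c : Char) (k : Nat) (hk : k ≤ cs.length) :
    PySem.Chars.findFrom cs [c] (k : Int) none = -1 ↔ c ∉ cs.drop k := by
  rw [PySem.Chars.findFrom_natCast_eq_neg_one_iff cs [c] k hk, List.singleton_infix_iff]

theorem pv_cfind_self (cs : List Char) (c : Char) (k : Nat) (hk : k < cs.length)
    (h : cs[k] = c) : PySem.Chars.findFrom cs [c] (k : Int) none = (k : Int) := by
  have hmem : c ∈ cs.drop k := by
    rw [List.drop_eq_getElem_cons hk, h]; exact List.mem_cons_self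
  have hne : PySem.Chars.findFrom cs [c] (k : Int) none ≠ -1 := by
    rw [ne_eq, pv_cfind_neg_iff cs c k (by omega)]; simp [hmem]
  obtain ⟨h1, h2, h3, h4⟩ := pv_cfind_spec cs c k (by omega) hne
  have : ¬ (k < (PySem.Chars.findFrom cs [c] (k : Int) none).toNat) := by
    intro hlt
    exact h4 k le_rfl hlt (by rw [List.getElem?_eq_getElem hk, h])
  omega

theorem pv_cfind_succ (cs : List Char) (c : Char) (k : Nat) (hk : k < cs.length)
    (h : cs[k] ≠ c) :
    PySem.Chars.findFrom cs [c] ((k : Int) + 1) none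
      = PySem.Chars.findFrom cs [c] (k : Int) none := by
  have hcast : ((k : Int) + 1) = (((k + 1 : Nat)) : Int) := by push_cast; ring
  rw [hcast]
  have hdrop : cs.drop k = cs[k] :: cs.drop (k + 1) := List.drop_eq_getElem_cons hk
  by_cases hneg : PySem.Chars.findFrom cs [c] (k : Int) none = -1
  · rw [hneg]
    rw [pv_cfind_neg_iff cs c k (by omega)] at hneg
    rw [pv_cfind_neg_iff cs c (k+1) (by omega)]
    intro hmem; exact hneg (by rw [hdrop]; exact List.mem_cons_of_mem _ hmem)
  · have hmem' : c ∈ cs.drop (k + 1) := by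
      have hmk : c ∈ cs.drop k := by
        by_contra hno; exact hneg ((pv_cfind_neg_iff cs c k (by omega)).2 hno)
      rw [hdrop] at hmk
      rcases List.mem_cons.1 hmk with h' | h'
      · exact absurd h'.symm h
      · exact h'
    have hneg2 : PySem.Chars.findFrom cs [c] ((k+1 : Nat) : Int) none ≠ -1 :=
      fun hq => absurd hmem' ((pv_cfind_neg_iff cs c (k+1) (by omega)).1 hq)
    obtain ⟨a1, a2, a3, a4⟩ := pv_cfind_spec cs c k (by omega) hneg
    obtain ⟨b1, b2, b3, b4⟩ := pv_cfind_spec cs c (k+1) (by omega) hneg2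
    have hta : k + 1 ≤ (PySem.Chars.findFrom cs [c] (k : Int) none).toNat := by
      rcases Nat.lt_or_ge k (PySem.Chars.findFrom cs [c] (k : Int) none).toNat with h' | h'
      · omega
      · exfalso
        have hq : (PySem.Chars.findFrom cs [c] (k : Int) none).toNat = k := by omega
        rw [hq] at a3
        exact h (by have hg := List.getElem?_eq_getElem hk; rw [hg] at a3; exact Option.some.inj a3)
    have h5 : ¬ ((PySem.Chars.findFrom cs [c] (k : Int) none).toNat <
        (PySem.Chars.findFrom cs [c] ((k+1:Nat) : Int) none).toNat) := by
      intro hlt; exact b4 _ hta hlt a3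
    have h6 : ¬ ((PySem.Chars.findFrom cs [c] ((k+1:Nat) : Int) none).toNat <
        (PySem.Chars.findFrom cs [c] (k : Int) none).toNat) := by
      intro hlt; exact a4 _ (by omega) hlt b3
    omega

theorem pvSpans_head (cs : List Char) (s s0 e0 : Nat) (col : String)
    (rest : List (Nat × String × Nat)) (h : pvSpans cs s = (s0, col, e0) :: rest) :
    s ≤ s0 ∧ s0 < cs.length := by
  rw [pvSpans] at h
  split_ifs at h with hj he
  have hs : s ≤ cs.length := by
    by_contra hgt
    exact hj (pv_cfind_gt cs '{' s (by omega))
  obtain ⟨hj1, hj2, -, -⟩ := pv_cfind_spec cs '{' s hs hj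
  have hs0 : s0 = (PySem.Chars.findFrom cs ['{'] (s : Int) none).toNat :=
    (Prod.mk.injEq _ _ _ _ ▸ (List.cons.injEq _ _ _ _ ▸ h.symm).1).1
  omega

theorem pvSpans_nil_of_no_close (cs : List Char) (s : Nat) (hs : s ≤ cs.length)
    (h : '}' ∉ cs.drop s) : pvSpans cs s = [] := by
  rw [pvSpans]
  split_ifs with hj he
  · rfl
  · rfl
  · exfalso
    apply he
    obtain ⟨hj1, hj2, -, -⟩ := pv_cfind_spec cs '{' s hs hj
    have hjn : PySem.Chars.findFrom cs ['{'] (s : Int) none =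
        ((PySem.Chars.findFrom cs ['{'] (s : Int) none).toNat : Int) := by omega
    rw [hjn]
    rw [pv_cfind_neg_iff cs '}' _ (by omega)]
    intro hmem
    apply h
    have hdd : cs.drop (PySem.Chars.findFrom cs ['{'] (s : Int) none).toNat
        = (cs.drop s).drop ((PySem.Chars.findFrom cs ['{'] (s : Int) none).toNat - s) := by
      rw [List.drop_drop]; congr 1; omega
    rw [hdd] at hmem
    exact List.mem_of_mem_drop hmem

theorem pvEmit_cons (cs : List Char) (k : Nat) (color : Option String)
    (spans : List (Nat × String × Nat)) (hk : k < cs.length)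
    (hsp : spans = [] ∨ ∃ s0 col e0 rest, spans = (s0, col, e0) :: rest ∧ k < s0) :
    pvEmit cs k color spans = (String.ofList [cs[k]], color) :: pvEmit cs (k + 1) color spans := by
  rcases hsp with rfl | ⟨s0, col, e0, rest, rfl, hlt⟩
  · simp only [pvEmit]
    rw [PySem.List.slice_from_natCast, PySem.List.slice_from_natCast]
    rw [List.drop_eq_getElem_cons hk, List.map_cons]
  · simp only [pvEmit]
    rw [PySem.List.slice_natCast, PySem.List.slice_natCast]
    rw [List.drop_eq_getElem_cons hk]
    have hsk : s0 - k = (s0 - (k + 1)) + 1 := by omega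
    rw [hsk, List.take_succ_cons]
    simp

theorem pvSpans_succ (cs : List Char) (i : Nat) (hlt : i < cs.length)
    (h : cs[i] ≠ '{') : pvSpans cs (i + 1) = pvSpans cs i := by
  have hF : PySem.Chars.findFrom cs ['{'] ((i + 1 : Nat) : Int) none
      = PySem.Chars.findFrom cs ['{'] (i : Int) none := by
    have := pv_cfind_succ cs '{' i hlt h
    push_cast
    push_cast at this
    exact this
  conv_lhs => rw [pvSpans]
  conv_rhs => rw [pvSpans]
  simp only [hF]

theorem pvSpans_at_len (cs : List Char) (s : Nat) (hs : cs.length ≤ s) :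
    pvSpans cs s = [] := by
  rcases Nat.lt_or_ge cs.length s with h | h
  · rw [pvSpans, dif_pos (pv_cfind_gt cs '{' s h)]
  · exact pvSpans_nil_of_no_close cs s h (by simp [List.drop_eq_nil_iff.2 hs])

theorem pvEmit_nil_ge (cs : List Char) (s : Nat) (color : Option String)
    (hs : cs.length ≤ s) : pvEmit cs s color [] = [] := by
  simp only [pvEmit]
  rw [PySem.List.slice_from_natCast]
  simp [List.drop_eq_nil_iff.2 hs]

theorem pvAgo_eq_aux (cs : List Char) :
    ∀ (d i : Nat) (color : Option String), 1 ≤ i → i ≤ cs.length → cs.length - i ≤ d →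
    pvAgo cs color i = pvEmit cs i color (pvSpans cs i) := by
  intro d
  induction d with
  | zero =>
    intro i color h1 h2 hd
    rw [pvAgo, dif_neg (by omega)]
    rw [pvSpans_at_len cs i (by omega), pvEmit_nil_ge cs i color (by omega)]
  | succ d ih =>
    intro i color h1 h2 hd
    by_cases hlt : i < cs.length
    · rw [pvAgo, dif_pos hlt]
      by_cases hbrace : cs[i] = '{'
      · rw [if_pos ⟨hbrace, h1⟩]
        by_cases he : PySem.Chars.findFrom cs ['}'] (i : Int) none = -1
        · rw [dif_neg (by simpa using he)]
          have hnc : '}' ∉ cs.drop i := (pv_cfind_neg_iff cs '}' i (by omega)).1 he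
          have hs1 : pvSpans cs i = [] := pvSpans_nil_of_no_close cs i (by omega) hnc
          have hnc2 : '}' ∉ cs.drop (i + 1) := by
            intro hm
            exact hnc (by rw [List.drop_eq_getElem_cons hlt]; exact List.mem_cons_of_mem _ hm)
          have hs2 : pvSpans cs (i + 1) = [] := pvSpans_nil_of_no_close cs (i + 1) (by omega) hnc2
          rw [ih (i + 1) color (by omega) (by omega) (by omega), hs1, hs2]
          rw [pvEmit_cons cs i color [] hlt (Or.inl rfl)]
        · rw [dif_pos he]
          obtain ⟨e1, e2, e3, -⟩ := pv_cfind_spec cs '}' i (by omega) he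
          have hFi : PySem.Chars.findFrom cs ['{'] (i : Int) none = (i : Int) :=
            pv_cfind_self cs '{' i hlt hbrace
          conv_rhs => rw [pvSpans]
          simp only [hFi]
          rw [dif_neg (show ¬ (i : Int) = -1 by omega), dif_neg he]
          simp only [pvEmit, Int.toNat_natCast]
          rw [PySem.List.slice_natCast]
          simp only [Nat.sub_self, List.take_zero, List.map_nil, List.nil_append]
          rw [ih ((PySem.Chars.findFrom cs ['}'] (i : Int) none).toNat + 1) _
            (by omega) (by omega) (by omega)]
      · rw [if_neg (by intro hc; exact hbrace hc.1)]
        rw [ih (i + 1) color (by omega) (by omega) (by omega)]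
        have hstep : pvEmit cs i color (pvSpans cs (i + 1))
            = (String.ofList [cs[i]], color) :: pvEmit cs (i + 1) color (pvSpans cs (i + 1)) := by
          rcases hsp : pvSpans cs (i + 1) with _ | ⟨⟨s0, col, e0⟩, rest⟩
          · exact pvEmit_cons cs i color [] hlt (Or.inl rfl)
          · exact pvEmit_cons cs i color _ hlt (Or.inr ⟨s0, col, e0, rest, rfl, by
              have := pvSpans_head cs (i + 1) s0 e0 col rest hsp; omega⟩)
        rw [← hstep, pvSpans_succ cs i hlt hbrace]
    · rw [pvAgo, dif_neg hlt]
      rw [pvSpans_at_len cs i (by omega), pvEmit_nil_ge cs i color (by omega)]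

theorem pvAgo_eq (cs : List Char) (i : Nat) (color : Option String)
    (h1 : 1 ≤ i) (h2 : i ≤ cs.length) :
    pvAgo cs color i = pvEmit cs i color (pvSpans cs i) :=
  pvAgo_eq_aux cs cs.length i color h1 h2 (by omega)

-- ===== VERDICT (by name: the statement is the Claim_ definition above) =====
theorem parse_colored_text_spec : Claim_equal_parse_colored_text := by
  unfold Claim_equal_parse_colored_text
  intro text hdom
  unfold Spec_parse_colored_text parse_colored_text parse_colored_text_alt
  by_cases hlen : text.toList.length = 0
  · rw [pvAgo, dif_neg (by omega)]
    rw [pvSpans_at_len text.toList 1 (by omega)]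
    rw [pvEmit_nil_ge text.toList 0 none (by omega)]
  · have h0 : 0 < text.toList.length := by omega
    rw [pvAgo, dif_pos h0, if_neg (by intro hc; exact absurd hc.2 (by omega))]
    rw [pvAgo_eq text.toList 1 none le_rfl (by omega)]
    have hstep : pvEmit text.toList 0 none (pvSpans text.toList 1)
        = (String.ofList [text.toList[0]], none)
            :: pvEmit text.toList 1 none (pvSpans text.toList 1) := by
      rcases hsp : pvSpans text.toList 1 with _ | ⟨⟨s0, col, e0⟩, rest⟩
      · exact pvEmit_cons _ 0 none [] h0 (Or.inl rfl)
      · exact pvEmit_cons _ 0 none _ h0 (Or.inr ⟨s0, col, e0, rest, rfl, by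
          have := pvSpans_head text.toList 1 s0 e0 col rest hsp; omega⟩)
    rw [hstep]
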